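-- pv_equiv track=rewrite | github.com/ljhason/smPy | src/smPy/main.py | intensity_in_circle
-- ===== SOURCE A (Python) =====
-- def intensity_in_circle(input_array, radius, y_centre, x_centre):
--     total_intensity = 0
--     intensity_arr = []
--     #filling in the circle
--     for i in range(x_centre - radius, x_centre + radius + 1):
--         for j in range(y_centre - radius, y_centre + radius + 1):
--             if (i - x_centre) ** 2 + (j - y_centre) ** 2 < radius ** 2:
--                 intensity_arr.append(int(input_array[j][i][2]))
--                 total_intensity += int(input_array[j][i][2])
--
--     return total_intensity, intensity_arr
-- ===== SOURCE B (Python) =====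
-- def _isqrt(n):
--     # largest r with r*r <= n, for n >= 0, by binary search
--     lo, hi = 0, n + 1
--     while hi - lo > 1:
--         mid = (lo + hi) // 2
--         if mid * mid <= n:
--             lo = mid
--         else:
--             hi = mid
--     return lo
--
--
-- def intensity_in_circle(input_array, radius, y_centre, x_centre):
--     total_intensity = 0
--     intensity_arr = []
--     for i in range(x_centre - radius, x_centre + radius + 1):
--         K = radius * radius - (i - x_centre) * (i - x_centre)
--         if K <= 0:
--             continue
--         d = _isqrt(K - 1)  # largest d with d*d < K
--         for j in range(y_centre - d, y_centre + d + 1):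
--             v = int(input_array[j][i][2])
--             intensity_arr.append(v)
--             total_intensity += v
--     return total_intensity, intensity_arr
-- ===== Notes on version B (the rewrite author's own statement) =====
-- stated objective: alternative
-- what changed: Instead of testing the circle inequality on every pixel of the full (2r+1)x(2r+1) bounding square, B computes each column's vertical in-circle span analytically with an integer square root (binary search) and visits only in-circle pixels.
import Mathlib
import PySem

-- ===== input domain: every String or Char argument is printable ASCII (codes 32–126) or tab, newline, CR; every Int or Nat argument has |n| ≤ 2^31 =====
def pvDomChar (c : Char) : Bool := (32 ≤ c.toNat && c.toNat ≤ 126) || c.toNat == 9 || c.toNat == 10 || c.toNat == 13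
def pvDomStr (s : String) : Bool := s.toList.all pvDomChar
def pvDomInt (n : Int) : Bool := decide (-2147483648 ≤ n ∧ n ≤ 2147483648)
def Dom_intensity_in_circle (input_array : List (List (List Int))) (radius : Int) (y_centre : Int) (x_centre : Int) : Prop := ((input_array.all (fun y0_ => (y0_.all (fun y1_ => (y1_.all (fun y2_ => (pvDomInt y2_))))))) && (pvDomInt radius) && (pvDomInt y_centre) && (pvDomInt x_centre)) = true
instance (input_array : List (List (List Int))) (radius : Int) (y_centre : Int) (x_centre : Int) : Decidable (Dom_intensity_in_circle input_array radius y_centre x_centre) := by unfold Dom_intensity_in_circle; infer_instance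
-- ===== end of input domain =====

-- B replaces A's per-pixel circle test by computing each column's vertical span with an
-- integer square root (binary search), visiting only in-circle pixels (objective: alternative; timing not measured).

-- ===== PORT A =====
def intensity_in_circle (input_array : List (List (List Int))) (radius : Int) (y_centre : Int) (x_centre : Int) : Int × List Int :=
  (PySem.List.pyRange (x_centre - radius) (x_centre + radius + 1) 1).foldl
    (fun st i =>
      (PySem.List.pyRange (y_centre - radius) (y_centre + radius + 1) 1).foldl
        (fun st j =>
          if (i - x_centre) ^ 2 + (j - y_centre) ^ 2 < radius ^ 2 then
            -- input_array[j][i][2]; pyGetD is exact under Pre_ (in-range indices)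
            let v := PySem.List.pyGetD (PySem.List.pyGetD (PySem.List.pyGetD input_array j []) i []) 2 0
            (st.1 + v, st.2 ++ [v])
          else st) st)
    (0, [])

-- ===== PORT B =====
-- _isqrt: binary search for the largest r with r*r ≤ n (Source B's while loop)
def isqrtAux (n lo hi : Int) : Int :=
  if _h : 1 < hi - lo then
    let mid := PySem.Int.floordiv (lo + hi) 2
    if mid * mid ≤ n then isqrtAux n mid hi else isqrtAux n lo mid
  else lo
termination_by (hi - lo).toNat
decreasing_by
  all_goals
    simp only [PySem.Int.floordiv_eq_ediv_of_pos (by omega : (0:Int) < 2)]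
    omega

def pyIsqrt (n : Int) : Int := isqrtAux n 0 (n + 1)

def intensity_in_circle_alt (input_array : List (List (List Int))) (radius : Int) (y_centre : Int) (x_centre : Int) : Int × List Int :=
  (PySem.List.pyRange (x_centre - radius) (x_centre + radius + 1) 1).foldl
    (fun st i =>
      let K := radius * radius - (i - x_centre) * (i - x_centre)
      if K ≤ 0 then st
      else
        let d := pyIsqrt (K - 1)
        (PySem.List.pyRange (y_centre - d) (y_centre + d + 1) 1).foldl
          (fun st j =>
            let v := PySem.List.pyGetD (PySem.List.pyGetD (PySem.List.pyGetD input_array j []) i []) 2 0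
            (st.1 + v, st.2 ++ [v])) st)
    (0, [])

-- ===== PRECONDITION & SPEC =====
-- Pre_ excludes exactly the inputs on which Python A raises IndexError: some in-circle
-- pixel access input_array[j][i][2] is out of range.  (If radius ≥ 1, the pixels (x_centre, y_centre ± (radius-1))
-- are in the circle, so the two explicit row-bound conjuncts are implied by the quantified
-- conjunct; they are stated first so the predicate evaluates without enumerating a huge range.)
def Pre_intensity_in_circle (input_array : List (List (List Int))) (radius : Int) (y_centre : Int) (x_centre : Int) : Prop :=
  radius < 1 ∨
  (-(input_array.length : Int) ≤ y_centre - (radius - 1) ∧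
   y_centre + (radius - 1) < (input_array.length : Int) ∧
   ∀ i ∈ PySem.List.pyRange (x_centre - radius) (x_centre + radius + 1) 1,
    ∀ j ∈ PySem.List.pyRange (y_centre - radius) (y_centre + radius + 1) 1,
      (i - x_centre) ^ 2 + (j - y_centre) ^ 2 < radius ^ 2 →
        PySem.Raise.InRange input_array.length j ∧
        PySem.Raise.InRange (PySem.List.pyGetD input_array j []).length i ∧
        PySem.Raise.InRange (PySem.List.pyGetD (PySem.List.pyGetD input_array j []) i []).length 2)

instance (input_array : List (List (List Int))) (radius : Int) (y_centre : Int) (x_centre : Int) : Decidable (Pre_intensity_in_circle input_array radius y_centre x_centre) := by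
  unfold Pre_intensity_in_circle; infer_instance

def pvWitness_intensity_in_circle : List (List (List Int)) × Int × Int × Int :=
  ([[[0,0,5],[0,0,6],[0,0,7]],[[0,0,1],[0,0,2],[0,0,3]],[[0,0,4],[0,0,8],[0,0,9]]], 1, 1, 1)

def Spec_intensity_in_circle (input_array : List (List (List Int))) (radius : Int) (y_centre : Int) (x_centre : Int) (out : Int × List Int) : Prop := out = intensity_in_circle_alt input_array radius y_centre x_centre
instance (input_array : List (List (List Int))) (radius : Int) (y_centre : Int) (x_centre : Int) (out : Int × List Int) : Decidable (Spec_intensity_in_circle input_array radius y_centre x_centre out) := by unfold Spec_intensity_in_circle; infer_instance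

-- ===== CLAIM (what is proved, stated in full; the proofs are below) =====
def Claim_equal_intensity_in_circle : Prop := ∀ (input_array : List (List (List Int))) (radius : Int) (y_centre : Int) (x_centre : Int), Dom_intensity_in_circle input_array radius y_centre x_centre → Pre_intensity_in_circle input_array radius y_centre x_centre → Spec_intensity_in_circle input_array radius y_centre x_centre (intensity_in_circle input_array radius y_centre x_centre)

-- ===== LEMMAS AND PROOFS =====

lemma isqrtAux_spec (m : Nat) : ∀ n lo hi : Int, (hi - lo).toNat ≤ m → 0 ≤ lo → lo * lo ≤ n → n < hi * hi → lo < hi →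
    0 ≤ isqrtAux n lo hi ∧ isqrtAux n lo hi * isqrtAux n lo hi ≤ n ∧
      n < (isqrtAux n lo hi + 1) * (isqrtAux n lo hi + 1) := by
  induction m with
  | zero =>
    intro n lo hi hm h0 h1 h2 h3
    omega
  | succ m ih =>
    intro n lo hi hm h0 h1 h2 h3
    rw [isqrtAux]
    by_cases h : 1 < hi - lo
    · rw [dif_pos h]
      have hmid : lo < PySem.Int.floordiv (lo + hi) 2 ∧ PySem.Int.floordiv (lo + hi) 2 < hi := by
        rw [PySem.Int.floordiv_eq_ediv_of_pos (by omega : (0:Int) < 2)]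
        omega
      by_cases hle : PySem.Int.floordiv (lo + hi) 2 * PySem.Int.floordiv (lo + hi) 2 ≤ n
      · rw [if_pos hle]
        exact ih n _ hi (by omega) (by omega) hle h2 hmid.2
      · rw [if_neg hle]
        exact ih n lo _ (by omega) h0 h1 (by omega) hmid.1
    · rw [dif_neg h]
      have hhi : hi ≤ lo + 1 := by omega
      have : hi * hi ≤ (lo + 1) * (lo + 1) := by nlinarith
      exact ⟨h0, h1, by nlinarith⟩

lemma pyIsqrt_spec (n : Int) (hn : 0 ≤ n) :
    0 ≤ pyIsqrt n ∧ pyIsqrt n * pyIsqrt n ≤ n ∧ n < (pyIsqrt n + 1) * (pyIsqrt n + 1) := by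
  exact isqrtAux_spec (n + 1).toNat n 0 (n + 1) (by omega) le_rfl (by simpa using hn) (by nlinarith) (by omega)

lemma foldl_if_false {S : Type} (l : List Int) (P : Int → Prop) [DecidablePred P]
    (f : S → Int → S) (h : ∀ j ∈ l, ¬ P j) (st : S) :
    l.foldl (fun st j => if P j then f st j else st) st = st := by
  induction l generalizing st with
  | nil => rfl
  | cons x xs ih =>
    simp only [List.foldl_cons, if_neg (h x (by simp))]
    exact ih (fun j hj => h j (by simp [hj])) st

lemma foldl_if_true {S : Type} (l : List Int) (P : Int → Prop) [DecidablePred P]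
    (f : S → Int → S) (h : ∀ j ∈ l, P j) (st : S) :
    l.foldl (fun st j => if P j then f st j else st) st = l.foldl f st := by
  induction l generalizing st with
  | nil => rfl
  | cons x xs ih =>
    simp only [List.foldl_cons, if_pos (h x (by simp))]
    exact ih (fun j hj => h j (by simp [hj])) (f st x)

-- the column lemma: A's filtered full-range scan = B's isqrt-delimited span scan
lemma column_eq {S : Type} (f : S → Int → S) (c r x i : Int) (hr : 0 ≤ r) (st : S) :
    (PySem.List.pyRange (c - r) (c + r + 1) 1).foldl
      (fun st j => if (i - x) ^ 2 + (j - c) ^ 2 < r ^ 2 then f st j else st) st =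
    (if r * r - (i - x) * (i - x) ≤ 0 then st
     else (PySem.List.pyRange (c - pyIsqrt (r * r - (i - x) * (i - x) - 1))
             (c + pyIsqrt (r * r - (i - x) * (i - x) - 1) + 1) 1).foldl f st) := by
  set K : Int := r * r - (i - x) * (i - x) with hK
  have hcond : ∀ j : Int, ((i - x) ^ 2 + (j - c) ^ 2 < r ^ 2) ↔ ((j - c) ^ 2 < K) := by
    intro j; constructor <;> intro h <;> nlinarith
  by_cases hK0 : K ≤ 0
  · rw [if_pos hK0]
    apply foldl_if_false
    intro j _ hc
    rw [hcond j] at hc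
    nlinarith [sq_nonneg (j - c)]
  · rw [if_neg hK0]
    push Not at hK0
    set d : Int := pyIsqrt (K - 1) with hd
    obtain ⟨hd0, hd1, hd2⟩ := pyIsqrt_spec (K - 1) (by omega)
    have hdr : d < r := by nlinarith
    rw [PySem.List.pyRange_one_append (c - r) (c - d) (c + r + 1) (by omega) (by omega),
        PySem.List.pyRange_one_append (c - d) (c + d + 1) (c + r + 1) (by omega) (by omega),
        List.foldl_append, List.foldl_append]
    rw [foldl_if_false (PySem.List.pyRange (c - r) (c - d) 1) _ f (by
      intro j hj hc
      rw [PySem.List.mem_pyRange_one] at hj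
      rw [hcond j] at hc
      nlinarith)]
    rw [foldl_if_true (PySem.List.pyRange (c - d) (c + d + 1) 1) _ f (by
      intro j hj
      rw [PySem.List.mem_pyRange_one] at hj
      rw [hcond j]
      nlinarith)]
    rw [foldl_if_false (PySem.List.pyRange (c + d + 1) (c + r + 1) 1) _ f (by
      intro j hj hc
      rw [PySem.List.mem_pyRange_one] at hj
      rw [hcond j] at hc
      nlinarith)]

theorem intensity_in_circle_eq_alt (input_array : List (List (List Int))) (radius : Int) (y_centre : Int) (x_centre : Int) :
    intensity_in_circle input_array radius y_centre x_centre =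
      intensity_in_circle_alt input_array radius y_centre x_centre := by
  unfold intensity_in_circle intensity_in_circle_alt
  apply PySem.List.foldl_congr_mem
  intro st i hi
  rw [PySem.List.mem_pyRange_one] at hi
  have hr : 0 ≤ radius := by omega
  exact column_eq _ y_centre radius x_centre i hr st

-- ===== VERDICT (by name: the statement is the Claim_ definition above) =====
theorem intensity_in_circle_spec : Claim_equal_intensity_in_circle := by
  intro input_array radius y_centre x_centre _ _
  exact intensity_in_circle_eq_alt input_array radius y_centre x_centre
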